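-- pv_equiv track=rewrite | github.com/Lecrut/Diffusion-code-generation | data/code/39_9_3.py | find_nested_substrings
-- ===== SOURCE A (Python) =====
-- def find_nested_substrings(phrase):
--     n = len(phrase)
--     substrings = set()
--     for i in range(n):
--         for j in range(i + 1, n + 1):
--             substrings.add(phrase[i:j])
--     result = list(substrings)
--     result.sort(key=lambda x: (len(x), x))
--     return result
-- ===== SOURCE B (Python) =====
-- def find_nested_substrings(phrase):
--     n = len(phrase)
--     result = []
--     for length in range(1, n + 1):
--         seen = set()
--         for i in range(n - length + 1):
--             seen.add(phrase[i:i + length])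
--         result.extend(sorted(seen))
--     return result
-- ===== Notes on version B (the rewrite author's own statement) =====
-- stated objective: alternative
-- what changed: Instead of one global set of all substrings sorted by the composite key (len, x), B iterates lengths in increasing order, collects the distinct substrings of each length in a per-length set, sorts each bucket lexicographically and concatenates the buckets.
import Mathlib
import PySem

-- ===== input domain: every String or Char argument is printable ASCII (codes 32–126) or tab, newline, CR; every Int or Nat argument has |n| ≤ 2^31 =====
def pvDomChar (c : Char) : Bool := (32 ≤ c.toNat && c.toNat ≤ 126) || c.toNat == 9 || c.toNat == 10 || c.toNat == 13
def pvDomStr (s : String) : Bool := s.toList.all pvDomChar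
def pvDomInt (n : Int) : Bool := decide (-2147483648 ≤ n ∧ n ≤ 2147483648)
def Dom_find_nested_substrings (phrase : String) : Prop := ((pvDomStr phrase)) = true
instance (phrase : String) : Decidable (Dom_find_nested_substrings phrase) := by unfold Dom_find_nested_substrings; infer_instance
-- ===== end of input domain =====

-- B replaces A's single global set sorted by the composite key (len, x) with a loop over lengths in
-- increasing order that collects, lex-sorts and appends the distinct substrings of each length (objective: alternative).

-- ===== PORT A =====
def find_nested_substrings (phrase : String) : List String :=
  let n : Int := PySem.Str.len phrase
  let substrings : PySem.Set String :=
    (PySem.List.pyRange 0 n).foldl (fun subs i =>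
      (PySem.List.pyRange (i + 1) (n + 1)).foldl (fun subs j =>
        PySem.Set.add subs (PySem.Str.slice phrase (some i) (some j))) subs)
      PySem.Set.empty
  PySem.List.sorted2 substrings (fun x => PySem.Str.len x) (fun x => x)

-- ===== PORT B =====
def find_nested_substrings_alt (phrase : String) : List String :=
  let n : Int := PySem.Str.len phrase
  (PySem.List.pyRange 1 (n + 1)).foldl (fun result length =>
    let seen : PySem.Set String :=
      (PySem.List.pyRange 0 (n - length + 1)).foldl (fun seen i =>
        PySem.Set.add seen (PySem.Str.slice phrase (some i) (some (i + length))))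
        PySem.Set.empty
    result ++ PySem.List.sorted seen (fun x => x)) []

-- ===== PRECONDITION & SPEC =====
def Spec_find_nested_substrings (phrase : String) (out : List String) : Prop := out = find_nested_substrings_alt phrase
instance (phrase : String) (out : List String) : Decidable (Spec_find_nested_substrings phrase out) := by unfold Spec_find_nested_substrings; infer_instance

-- ===== CLAIM (what is proved, stated in full; the proofs are below) =====
def Claim_equal_find_nested_substrings : Prop := ∀ (phrase : String), Dom_find_nested_substrings phrase → Spec_find_nested_substrings phrase (find_nested_substrings phrase)

-- ===== LEMMAS AND PROOFS =====

-- the strict and non-strict lexicographic order on a pair of keys (Python's tuple key (k1 x, k2 x))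
def lex2 {α κ₁ κ₂ : Type} [LinearOrder κ₁] [LinearOrder κ₂] (k1 : α → κ₁) (k2 : α → κ₂) (a b : α) : Prop :=
  k1 a < k1 b ∨ (k1 a = k1 b ∧ k2 a < k2 b)

def lex2le {α κ₁ κ₂ : Type} [LinearOrder κ₁] [LinearOrder κ₂] (k1 : α → κ₁) (k2 : α → κ₂) (a b : α) : Prop :=
  k1 a < k1 b ∨ (k1 a = k1 b ∧ k2 a ≤ k2 b)

theorem insertBy_nil {α : Type} (before : α → α → Bool) (x : α) :
    PySem.List.insertBy before x [] = [x] := rfl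

theorem insertBy_cons {α : Type} (before : α → α → Bool) (x y : α) (ys : List α) :
    PySem.List.insertBy before x (y :: ys) =
      if before x y then x :: y :: ys else y :: PySem.List.insertBy before x ys := rfl

theorem lex2le_trans {α κ₁ κ₂ : Type} [LinearOrder κ₁] [LinearOrder κ₂] (k1 : α → κ₁) (k2 : α → κ₂)
    {a b c : α} (h1 : lex2le k1 k2 a b) (h2 : lex2le k1 k2 b c) : lex2le k1 k2 a c := by
  rcases h1 with h1 | ⟨e1, l1⟩ <;> rcases h2 with h2 | ⟨e2, l2⟩
  · exact Or.inl (h1.trans h2)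
  · exact Or.inl (e2 ▸ h1)
  · exact Or.inl (e1 ▸ h2)
  · exact Or.inr ⟨e1.trans e2, l1.trans l2⟩

theorem lex2le_of_before_true {α κ₁ κ₂ : Type} [LinearOrder κ₁] [LinearOrder κ₂]
    (k1 : α → κ₁) (k2 : α → κ₂) {a b : α}
    (h : (decide (k1 a < k1 b) || !decide (k1 b < k1 a) && decide (k2 a < k2 b)) = true) :
    lex2le k1 k2 a b := by
  simp only [Bool.or_eq_true, Bool.and_eq_true, Bool.not_eq_eq_eq_not, Bool.not_true,
    decide_eq_true_eq, decide_eq_false_iff_not] at h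
  rcases h with h | ⟨h1, h2⟩
  · exact Or.inl h
  · rcases lt_trichotomy (k1 a) (k1 b) with ht | ht | ht
    · exact Or.inl ht
    · exact Or.inr ⟨ht, le_of_lt h2⟩
    · exact absurd ht h1

theorem lex2le_of_before_false {α κ₁ κ₂ : Type} [LinearOrder κ₁] [LinearOrder κ₂]
    (k1 : α → κ₁) (k2 : α → κ₂) {a b : α}
    (h : (decide (k1 a < k1 b) || !decide (k1 b < k1 a) && decide (k2 a < k2 b)) = false) :
    lex2le k1 k2 b a := by
  simp only [Bool.or_eq_false_iff, Bool.and_eq_false_iff, Bool.not_eq_eq_eq_not, Bool.not_false,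
    decide_eq_true_eq, decide_eq_false_iff_not] at h
  rcases h with ⟨h1, h2 | h2⟩
  · exact Or.inl h2
  · rcases lt_trichotomy (k1 a) (k1 b) with ht | ht | ht
    · exact absurd ht h1
    · exact Or.inr ⟨ht.symm, le_of_not_gt h2⟩
    · exact Or.inl ht

theorem insertBy_pairwise_lex2 {α κ₁ κ₂ : Type} [LinearOrder κ₁] [LinearOrder κ₂]
    (k1 : α → κ₁) (k2 : α → κ₂) (x : α) (ys : List α)
    (h : ys.Pairwise (lex2le k1 k2)) :
    (PySem.List.insertBy
      (fun a b => decide (k1 a < k1 b) || !decide (k1 b < k1 a) && decide (k2 a < k2 b)) x ys).Pairwise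
      (lex2le k1 k2) := by
  induction ys with
  | nil => simp [insertBy_nil]
  | cons y ys ih =>
    rw [insertBy_cons]
    rcases List.pairwise_cons.mp h with ⟨hy, htail⟩
    by_cases hb : (decide (k1 x < k1 y) || !decide (k1 y < k1 x) && decide (k2 x < k2 y)) = true
    · rw [if_pos hb]
      refine List.pairwise_cons.mpr ⟨?_, h⟩
      intro z hz
      rcases List.mem_cons.mp hz with rfl | hz
      · exact lex2le_of_before_true k1 k2 hb
      · exact lex2le_trans k1 k2 (lex2le_of_before_true k1 k2 hb) (hy z hz)
    · rw [if_neg hb]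
      refine List.pairwise_cons.mpr ⟨?_, ih htail⟩
      intro z hz
      rcases (PySem.List.insertBy_mem_iff _ x z ys).mp hz with rfl | hz
      · exact lex2le_of_before_false k1 k2 (Bool.not_eq_true _ ▸ hb)
      · exact hy z hz

theorem sorted2_pairwise_lex2 {α κ₁ κ₂ : Type} [LinearOrder κ₁] [LinearOrder κ₂]
    (xs : List α) (k1 : α → κ₁) (k2 : α → κ₂) :
    (PySem.List.sorted2 xs k1 k2).Pairwise (lex2le k1 k2) := by
  show (xs.foldl (fun acc x => PySem.List.insertBy
      (fun a b => decide (k1 a < k1 b) || !decide (k1 b < k1 a) && decide (k2 a < k2 b)) x acc)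
      []).Pairwise (lex2le k1 k2)
  have key : ∀ (l : List α) (acc : List α), acc.Pairwise (lex2le k1 k2) →
      (l.foldl (fun acc x => PySem.List.insertBy
        (fun a b => decide (k1 a < k1 b) || !decide (k1 b < k1 a) && decide (k2 a < k2 b)) x acc)
        acc).Pairwise (lex2le k1 k2) := by
    intro l
    induction l with
    | nil => intro acc hacc; exact hacc
    | cons x l ih =>
      intro acc hacc
      exact ih _ (insertBy_pairwise_lex2 k1 k2 x acc hacc)
  exact key xs [] (List.Pairwise.nil)

theorem sorted2_eq_of_perm_of_pairwise_lex2 {α κ₁ κ₂ : Type} [LinearOrder κ₁] [LinearOrder κ₂]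
    (xs ys : List α) (k1 : α → κ₁) (k2 : α → κ₂)
    (hperm : ys.Perm xs) (hpw : ys.Pairwise (lex2 k1 k2)) :
    PySem.List.sorted2 xs k1 k2 = ys := by
  have hsp : (PySem.List.sorted2 xs k1 k2).Perm ys :=
    (PySem.List.sorted2_perm xs k1 k2 false).trans hperm.symm
  have hsym : ∀ a b : α, a ∈ ys → b ∈ ys → a ≠ b → lex2 k1 k2 a b ∨ lex2 k1 k2 b a := by
    have h2 : ys.Pairwise (fun a b => lex2 k1 k2 a b ∨ lex2 k1 k2 b a) := hpw.imp Or.inl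
    intro a b ha hb hne
    exact List.Pairwise.forall (fun p q h => h.symm) h2 ha hb hne
  refine List.Perm.eq_of_pairwise ?_ (sorted2_pairwise_lex2 xs k1 k2)
    (hpw.imp (fun h => h.imp id (fun h => ⟨h.1, le_of_lt h.2⟩))) hsp
  intro a b ha hb hab hba
  have ha' : a ∈ ys := hsp.subset ha
  by_contra hne
  have hk1 : k1 a = k1 b := by
    rcases hab with h | ⟨e, _⟩
    · rcases hba with h' | ⟨e', _⟩
      · exact absurd (h.trans h') (lt_irrefl _)
      · exact e'.symm
    · exact e
  have hk2 : k2 a = k2 b := by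
    rcases hab with h | ⟨_, l⟩
    · exact absurd hk1 (ne_of_lt h)
    · rcases hba with h' | ⟨_, l'⟩
      · exact absurd hk1.symm (ne_of_lt h')
      · exact le_antisymm l l'
  rcases hsym a b ha' hb hne with h | h <;> rcases h with h | ⟨_, h⟩
  · exact absurd hk1 (ne_of_lt h)
  · exact absurd hk2 (ne_of_lt h)
  · exact absurd hk1.symm (ne_of_lt h)
  · exact absurd hk2.symm (ne_of_lt h)

-- the list of substrings B's inner loop enumerates for one length L
def benum (phrase : String) (L : Int) : List String :=
  (PySem.List.pyRange 0 (PySem.Str.len phrase - L + 1)).map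
    (fun i => PySem.Str.slice phrase (some i) (some (i + L)))

-- the list of substrings A's nested loops enumerate
def aenum (phrase : String) : List String :=
  (PySem.List.pyRange 0 (PySem.Str.len phrase)).flatMap
    (fun i => (PySem.List.pyRange (i + 1) (PySem.Str.len phrase + 1)).map
      (fun j => PySem.Str.slice phrase (some i) (some j)))

-- B's bucket for length L, lexicographically sorted
def bucket (phrase : String) (L : Int) : List String :=
  PySem.List.sorted (PySem.Set.ofList (benum phrase L)) (fun x => x)

theorem double_fold_set {α : Type} [BEq α] (l : List Int) (g : Int → List Int) (f : Int → Int → α)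
    (s : PySem.Set α) :
    l.foldl (fun s i => (g i).foldl (fun s j => PySem.Set.add s (f i j)) s) s
      = s.update (l.flatMap (fun i => (g i).map (f i))) := by
  induction l generalizing s with
  | nil => simp [PySem.Set.update_nil]
  | cons i l ih =>
    rw [List.foldl_cons, List.flatMap_cons, PySem.Set.update_append, ih,
      ← PySem.Set.update_map_eq_foldl_add]

theorem find_A_eq (phrase : String) :
    find_nested_substrings phrase =
      PySem.List.sorted2 (PySem.Set.ofList (aenum phrase)) (fun x => PySem.Str.len x) (fun x => x) := by
  simp only [find_nested_substrings, aenum]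
  rw [double_fold_set, PySem.Set.update_empty]

theorem find_B_eq (phrase : String) :
    find_nested_substrings_alt phrase =
      (PySem.List.pyRange 1 (PySem.Str.len phrase + 1)).flatMap (bucket phrase) := by
  simp only [find_nested_substrings_alt]
  rw [PySem.List.foldl_append_eq_flatMap
    (g := fun length => PySem.List.sorted
      ((PySem.List.pyRange 0 (PySem.Str.len phrase - length + 1)).foldl
        (fun seen i => PySem.Set.add seen (PySem.Str.slice phrase (some i) (some (i + length))))
        PySem.Set.empty) (fun x => x))]
  rw [List.nil_append]
  refine List.flatMap_congr (fun L _ => ?_)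
  rw [bucket, benum, ← PySem.Set.update_map_eq_foldl_add, PySem.Set.update_empty]

theorem len_slice_add (phrase : String) (i L : Int) (h0 : 0 ≤ i) (h1 : 0 < L)
    (h2 : i + L ≤ PySem.Str.len phrase) :
    PySem.Str.len (PySem.Str.slice phrase (some i) (some (i + L))) = L := by
  obtain ⟨a, rfl⟩ : ∃ a : Nat, i = (a : Int) := ⟨i.toNat, (Int.toNat_of_nonneg h0).symm⟩
  obtain ⟨b, rfl⟩ : ∃ b : Nat, L = (b : Int) := ⟨L.toNat, (Int.toNat_of_nonneg h1.le).symm⟩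
  have hab : (a : Int) + b = ((a + b : Nat) : Int) := by push_cast; ring
  have hn : a + b ≤ phrase.toList.length := by
    have := h2; simp only [PySem.Str.len] at this; omega
  simp only [PySem.Str.len, PySem.Str.slice, PySem.Chars.slice, String.toList_ofList, hab,
    PySem.List.length_slice, PySem.List.clampIdx_natCast]
  omega

theorem len_of_mem_benum (phrase : String) (L : Int) (x : String) (hL : 1 ≤ L)
    (hx : x ∈ benum phrase L) : PySem.Str.len x = L := by
  rcases List.mem_map.mp hx with ⟨i, hi, rfl⟩
  rcases PySem.List.mem_pyRange_one.mp hi with ⟨h0, h1⟩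
  exact len_slice_add phrase i L h0 (by omega) (by omega)

theorem len_of_mem_bucket (phrase : String) (L : Int) (x : String) (hL : 1 ≤ L)
    (hx : x ∈ bucket phrase L) : PySem.Str.len x = L := by
  rw [bucket, PySem.List.mem_sorted, PySem.Set.mem_ofList] at hx
  exact len_of_mem_benum phrase L x hL hx

theorem nodup_flatMap_bucket (phrase : String) :
    ((PySem.List.pyRange 1 (PySem.Str.len phrase + 1)).flatMap (bucket phrase)).Nodup := by
  rw [List.nodup_flatMap]
  constructor
  · intro L _
    exact ((PySem.List.sorted_perm _ _ false).nodup_iff).mpr (PySem.Set.nodup_ofList _)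
  · refine List.Pairwise.imp_of_mem ?_ (PySem.List.pairwise_lt_pyRange_one 1 (PySem.Str.len phrase + 1))
    intro L L' hL hL' hlt x hx hx'
    have h1 := len_of_mem_bucket phrase L x (PySem.List.mem_pyRange_one.mp hL).1 hx
    have h2 := len_of_mem_bucket phrase L' x (PySem.List.mem_pyRange_one.mp hL').1 hx'
    omega

theorem mem_flatMap_bucket_iff (phrase : String) (x : String) :
    x ∈ (PySem.List.pyRange 1 (PySem.Str.len phrase + 1)).flatMap (bucket phrase)
      ↔ x ∈ aenum phrase := by
  simp only [List.mem_flatMap, bucket, PySem.List.mem_sorted, PySem.Set.mem_ofList, benum,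
    aenum, List.mem_map, PySem.List.mem_pyRange_one]
  constructor
  · rintro ⟨L, ⟨hL1, hL2⟩, i, ⟨hi1, hi2⟩, rfl⟩
    exact ⟨i, ⟨hi1, by omega⟩, i + L, ⟨by omega, by omega⟩, rfl⟩
  · rintro ⟨i, ⟨hi1, hi2⟩, j, ⟨hj1, hj2⟩, rfl⟩
    refine ⟨j - i, ⟨by omega, by omega⟩, i, ⟨hi1, by omega⟩, ?_⟩
    congr 2
    omega

theorem pairwise_flatMap_bucket (phrase : String) :
    ((PySem.List.pyRange 1 (PySem.Str.len phrase + 1)).flatMap (bucket phrase)).Pairwise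
      (lex2 (fun x : String => PySem.Str.len x) (fun x => x)) := by
  rw [List.pairwise_flatMap]
  constructor
  · intro L hL
    have hL1 : 1 ≤ L := (PySem.List.mem_pyRange_one.mp hL).1
    refine List.Pairwise.imp_of_mem ?_
      (PySem.List.sorted_ofList_pairwise_lt (benum phrase L))
    intro a b ha hb hlt
    have ha' := len_of_mem_bucket phrase L a hL1 ha
    have hb' := len_of_mem_bucket phrase L b hL1 hb
    exact Or.inr ⟨by show PySem.Str.len a = PySem.Str.len b; rw [ha', hb'], hlt⟩
  · refine List.Pairwise.imp_of_mem ?_ (PySem.List.pairwise_lt_pyRange_one 1 (PySem.Str.len phrase + 1))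
    intro L L' hL hL' hlt x hx y hy
    have h1 := len_of_mem_bucket phrase L x (PySem.List.mem_pyRange_one.mp hL).1 hx
    have h2 := len_of_mem_bucket phrase L' y (PySem.List.mem_pyRange_one.mp hL').1 hy
    exact Or.inl (by show PySem.Str.len x < PySem.Str.len y; rw [h1, h2]; exact hlt)

theorem find_eq (phrase : String) :
    find_nested_substrings phrase = find_nested_substrings_alt phrase := by
  rw [find_A_eq, find_B_eq]
  refine sorted2_eq_of_perm_of_pairwise_lex2 _ _ _ _ ?_ (pairwise_flatMap_bucket phrase)
  rw [List.perm_ext_iff_of_nodup (nodup_flatMap_bucket phrase) (PySem.Set.nodup_ofList _)]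
  intro x
  rw [mem_flatMap_bucket_iff, PySem.Set.mem_ofList]

-- ===== VERDICT (by name: the statement is the Claim_ definition above) =====
theorem find_nested_substrings_spec : Claim_equal_find_nested_substrings := by
  intro phrase _
  unfold Spec_find_nested_substrings
  exact find_eq phrase
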